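-- pv_equiv track=rewrite | github.com/suryanshsoni27/DSA | Python/chefeasy.py | caculateday
-- ===== SOURCE A (Python) =====
-- def caculateday(arr, arrdn):
--     val = arrdn
--     summ = sum(arr)
--
--     count = 1
--     while(summ >= arrdn[1]):
--         summ = summ - arrdn[1]
--         count += 1
--
--     return count
-- ===== SOURCE B (Python) =====
-- def caculateday(arr, arrdn):
--     d = arrdn[1]
--     s = sum(arr)
--     if s < d:
--         return 1
--     return 1 + s // d
-- ===== Notes on version B (the rewrite author's own statement) =====
-- stated objective: simpler
-- what changed: replaces the repeated-subtraction loop with one closed-form floor division: 1 + sum(arr)//arrdn[1] when the loop would run, else 1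
import Mathlib
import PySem

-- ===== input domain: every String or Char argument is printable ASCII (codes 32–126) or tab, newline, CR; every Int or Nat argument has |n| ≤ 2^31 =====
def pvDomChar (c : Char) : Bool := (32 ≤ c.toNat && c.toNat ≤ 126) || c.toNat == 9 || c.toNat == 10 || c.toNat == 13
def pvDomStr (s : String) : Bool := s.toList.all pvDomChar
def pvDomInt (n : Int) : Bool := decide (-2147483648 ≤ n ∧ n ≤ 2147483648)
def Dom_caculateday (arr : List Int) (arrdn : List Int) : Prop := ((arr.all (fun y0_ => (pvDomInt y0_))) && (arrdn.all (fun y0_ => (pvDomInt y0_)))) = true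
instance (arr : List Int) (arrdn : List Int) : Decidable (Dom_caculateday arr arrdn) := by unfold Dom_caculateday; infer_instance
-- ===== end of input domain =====

-- B replaces A's repeated-subtraction while-loop by a single closed-form floor division (objective: simpler).

-- ===== PORT A =====
-- A's while-loop; the '0 < d' conjunct only makes the recursion total (with d ≤ 0 and
-- d ≤ summ the Python loop diverges; such inputs are outside Pre_caculateday).
def pvLoopA (d : Int) (summ : Int) (count : Int) : Int :=
  if h : 0 < d ∧ d ≤ summ then pvLoopA d (summ - d) (count + 1) else count
termination_by summ.toNat
decreasing_by omega

def caculateday (arr : List Int) (arrdn : List Int) : Int :=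
  match PySem.List.pyGet? arrdn 1 with
  | some d => pvLoopA d arr.sum 1        -- summ = sum(arr); count = 1; while summ >= arrdn[1]: ...
  | none => 0                            -- IndexError: outside Pre_caculateday

-- ===== PORT B =====
def caculateday_alt (arr : List Int) (arrdn : List Int) : Int :=
  match PySem.List.pyGet? arrdn 1 with
  | some d =>
      let s := arr.sum
      if s < d then 1 else 1 + PySem.Int.floordiv s d
  | none => 0                            -- IndexError: outside Pre_caculateday

-- ===== PRECONDITION & SPEC =====
-- Pre_ excludes exactly the inputs where A does not return: len(arrdn) < 2 (IndexError)
-- and arrdn[1] ≤ 0 ≤-ish with sum(arr) ≥ arrdn[1] (the while-loop never terminates).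
def Pre_caculateday (arr : List Int) (arrdn : List Int) : Prop :=
  2 ≤ arrdn.length ∧ (0 < arrdn[1]! ∨ arr.sum < arrdn[1]!)
instance (arr : List Int) (arrdn : List Int) : Decidable (Pre_caculateday arr arrdn) := by
  unfold Pre_caculateday; infer_instance

def pvWitness_caculateday : List Int × List Int := ([5, 4], [0, 3])

def Spec_caculateday (arr : List Int) (arrdn : List Int) (out : Int) : Prop := out = caculateday_alt arr arrdn
instance (arr : List Int) (arrdn : List Int) (out : Int) : Decidable (Spec_caculateday arr arrdn out) := by unfold Spec_caculateday; infer_instance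

-- ===== CLAIM (what is proved, stated in full; the proofs are below) =====
def Claim_equal_caculateday : Prop := ∀ (arr : List Int) (arrdn : List Int), Dom_caculateday arr arrdn → Pre_caculateday arr arrdn → Spec_caculateday arr arrdn (caculateday arr arrdn)

-- ===== LEMMAS AND PROOFS =====

theorem pvLoopA_closed (d summ count : Int) (h : 0 < d ∨ summ < d) :
    pvLoopA d summ count = count + (if summ < d then 0 else PySem.Int.floordiv summ d) := by
  induction summ, count using pvLoopA.induct d with
  | case1 summ count hc ih =>
      rw [pvLoopA, dif_pos hc]
      obtain ⟨hd, hds⟩ := hc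
      rw [ih (Or.inl hd)]
      have hd0 : d ≠ 0 := by omega
      have hfd : PySem.Int.floordiv summ d = PySem.Int.floordiv (summ - d) d + 1 := by
        rw [PySem.Int.floordiv_eq_ediv_of_pos hd, PySem.Int.floordiv_eq_ediv_of_pos hd]
        have key := Int.add_mul_ediv_right (summ - d) 1 hd0
        have hs2 : summ - d + 1 * d = summ := by ring
        rw [hs2] at key
        exact key
      have hsd : ¬ summ < d := by omega
      by_cases hlt : summ - d < d
      · have h0 : PySem.Int.floordiv (summ - d) d = 0 := by
          rw [PySem.Int.floordiv_eq_ediv_of_pos hd]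
          exact Int.ediv_eq_zero_of_lt (by omega) hlt
        rw [if_pos hlt, if_neg hsd, hfd, h0]
        ring
      · rw [if_neg hlt, if_neg hsd, hfd]
        ring
  | case2 summ count hc =>
      rw [pvLoopA, dif_neg hc]
      have hs : summ < d := by
        rcases h with hd | hs
        · by_contra hn; exact hc ⟨hd, by omega⟩
        · exact hs
      rw [if_pos hs]
      ring

-- ===== VERDICT (by name: the statement is the Claim_ definition above) =====
theorem caculateday_spec : Claim_equal_caculateday := by
  intro arr arrdn _dom hpre
  obtain ⟨hlen, hd⟩ := hpre
  have h1 : (1 : Nat) < arrdn.length := by omega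
  have hget : PySem.List.pyGet? arrdn 1 = some arrdn[1]! := by
    rw [show (1:Int) = ((1:Nat):Int) by norm_num, PySem.List.pyGet?_natCast]
    simp [List.getElem!_eq_getElem?_getD, List.getElem?_eq_getElem h1]
  unfold Spec_caculateday caculateday caculateday_alt
  rw [hget]
  simp only
  rw [pvLoopA_closed _ _ _ hd]
  split_ifs <;> simp
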